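-- pv_equiv track=rewrite | github.com/FDzhaozi/LLM4DocSimp | Methods/evaluate.py | seg_alis
-- ===== SOURCE A (Python) =====
-- def seg_alis(text):
--     # Split the text by '\n'
--     segments = text.split('\n')
--     # 删除空白片段
--     segments = [seg for seg in segments if seg.strip()]
--
--     # Filter out segments that contain both "小" and "说"
--     filtered_segments = [seg for seg in segments if not ("小" in seg and "说" in seg)]
--
--     chapters = []
--     current_chapter = []
--
--     for seg in filtered_segments:
--         # Check if the segment contains both 'w' (case-insensitive) and '.'
--         if any(char in seg for char in ['w', 'W']):
--             # If current chapter has content, add it to the list of chapters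
--             if current_chapter:
--                 chapters.append('\n'.join(current_chapter))
--                 current_chapter = []
--         else:
--             current_chapter.append(seg)
--
--     # Add the last chapter if it has content
--     if current_chapter:
--         chapters.append('\n'.join(current_chapter))
--
--     return chapters
-- ===== SOURCE B (Python) =====
-- def seg_alis(text):
--     # same two filter passes as the original
--     lines = [seg for seg in text.split('\n') if seg.strip()]
--     lines = [seg for seg in lines if not ("小" in seg and "说" in seg)]
--     # two-pointer scan: skip to the next delimiter line, emit the slice between
--     chapters = []
--     n = len(lines)
--     i = 0
--     while i < n:
--         j = i
--         while j < n and not ('w' in lines[j] or 'W' in lines[j]):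
--             j += 1
--         if i < j:
--             chapters.append('\n'.join(lines[i:j]))
--         i = j + 1
--     return chapters
-- ===== Notes on version B (the rewrite author's own statement) =====
-- stated objective: alternative
-- what changed: The manual current_chapter accumulator with flush-on-delimiter is replaced by a two-pointer index scan: skip to the next delimiter line and emit the newline-joined slice between consecutive delimiters.
import Mathlib
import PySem

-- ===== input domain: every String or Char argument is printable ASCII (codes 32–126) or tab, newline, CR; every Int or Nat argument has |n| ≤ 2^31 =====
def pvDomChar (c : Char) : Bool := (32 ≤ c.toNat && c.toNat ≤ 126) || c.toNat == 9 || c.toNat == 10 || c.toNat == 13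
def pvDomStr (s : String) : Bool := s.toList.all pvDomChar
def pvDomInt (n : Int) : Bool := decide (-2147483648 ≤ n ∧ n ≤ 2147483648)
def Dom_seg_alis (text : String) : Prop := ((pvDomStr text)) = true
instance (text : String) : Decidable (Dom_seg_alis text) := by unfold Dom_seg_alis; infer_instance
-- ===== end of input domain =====

-- B replaces A's flush-on-delimiter accumulator loop by a two-pointer index scan over the
-- filtered lines (same cost; objective: alternative decomposition). Return value only; no mutation.

-- ===== PORT A =====
-- text.split('\n'): sep = "\n" ≠ "", so split? is always `some`; getD [] never takes its default
def seg_alis (text : String) : List String :=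
  let segments := (PySem.Str.split? text "\n").getD []
  let segments := segments.filter (fun seg => PySem.Str.strip seg != "")
  let filtered := segments.filter (fun seg => !(PySem.Str.isIn "小" seg && PySem.Str.isIn "说" seg))
  -- for seg in filtered_segments: … (state = (chapters, current_chapter))
  let st := filtered.foldl (fun (acc : List String × List String) seg =>
      if ["w", "W"].any (fun ch => PySem.Str.isIn ch seg) then
        if acc.2 ≠ [] then (acc.1 ++ [PySem.Str.join "\n" acc.2], ([] : List String)) else acc
      else (acc.1, acc.2 ++ [seg])) ([], [])
  if st.2 ≠ [] then st.1 ++ [PySem.Str.join "\n" st.2] else st.1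

-- ===== PORT B =====
def segDelimB (seg : String) : Bool :=
  PySem.Str.isIn "w" seg || PySem.Str.isIn "W" seg

-- inner while: j advances while j < n and lines[j] is not a delimiter
-- (lines.getD j "" is exact for lines[j]: it is only read under the guard 0 ≤ j < n)
def segSkipB (lines : List String) (j : Nat) : Nat :=
  if j < lines.length then
    if segDelimB (lines.getD j "") then j else segSkipB lines (j + 1)
  else j
termination_by lines.length - j

-- needed by segScanB's termination argument
theorem segSkipB_ge (lines : List String) (j : Nat) : j ≤ segSkipB lines j := by
  unfold segSkipB
  split
  · split
    · exact Nat.le_refl j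
    · have := segSkipB_ge lines (j + 1); omega
  · exact Nat.le_refl j
termination_by lines.length - j

-- outer while: from i, find the next delimiter position j, emit lines[i:j] if nonempty, resume at j+1
-- ((lines.drop i).take (j - i) is exact for the slice lines[i:j]: here 0 ≤ i ≤ j)
def segScanB (lines : List String) (i : Nat) (chapters : List String) : List String :=
  if i < lines.length then
    let j := segSkipB lines i
    let chapters := if i < j then chapters ++ [PySem.Str.join "\n" ((lines.drop i).take (j - i))] else chapters
    segScanB lines (j + 1) chapters
  else chapters
termination_by lines.length - i
decreasing_by have := segSkipB_ge lines i; omega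

def seg_alis_alt (text : String) : List String :=
  let lines := ((PySem.Str.split? text "\n").getD []).filter (fun seg => PySem.Str.strip seg != "")
  let lines := lines.filter (fun seg => !(PySem.Str.isIn "小" seg && PySem.Str.isIn "说" seg))
  segScanB lines 0 []

-- ===== PRECONDITION & SPEC =====
def Spec_seg_alis (text : String) (out : List String) : Prop := out = seg_alis_alt text
instance (text : String) (out : List String) : Decidable (Spec_seg_alis text out) := by unfold Spec_seg_alis; infer_instance

-- ===== CLAIM (what is proved, stated in full; the proofs are below) =====
def Claim_equal_seg_alis : Prop := ∀ (text : String), Dom_seg_alis text → Spec_seg_alis text (seg_alis text)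

-- ===== LEMMAS AND PROOFS =====

-- the common non-delimiter predicate
def segND (seg : String) : Bool := !segDelimB seg

-- middle spec: structural grouping of the filtered lines
def segGroups : List String → List String
  | [] => []
  | l :: ls =>
    let pre := (l :: ls).takeWhile segND
    let rest := segGroups (((l :: ls).dropWhile segND).drop 1)
    if pre ≠ [] then PySem.Str.join "\n" pre :: rest else rest
termination_by ls => ls.length
decreasing_by
  have h := List.length_dropWhile_le segND (l :: ls)
  have h2 : (l :: ls).length = ls.length + 1 := by simp
  simp only [List.length_drop]
  omega

theorem segGroups_nil : segGroups [] = [] := by rw [segGroups]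

theorem segGroups_eq (ls : List String) :
    segGroups ls =
      (if ls.takeWhile segND ≠ [] then
        PySem.Str.join "\n" (ls.takeWhile segND) :: segGroups ((ls.dropWhile segND).drop 1)
      else segGroups ((ls.dropWhile segND).drop 1)) := by
  cases ls with
  | nil => simp [segGroups_nil]
  | cons l t => conv_lhs => rw [segGroups]

theorem seg_take_takeWhile {α : Type} (p : α → Bool) (l : List α) :
    l.take (l.takeWhile p).length = l.takeWhile p := by
  induction l with
  | nil => rfl
  | cons a t ih =>
    by_cases h : p a
    · simp [h, ih]
    · simp [h]

theorem seg_dropWhile_eq_drop {α : Type} (p : α → Bool) (l : List α) :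
    l.dropWhile p = l.drop (l.takeWhile p).length := by
  induction l with
  | nil => rfl
  | cons a t ih =>
    by_cases h : p a
    · simp [List.takeWhile_cons, h, ih]
    · simp [List.takeWhile_cons, h]

-- A's loop equals the structural grouping, generalized over the running state
theorem segA_loop_eq (ls : List String) (chapters cur : List String) :
    (let st := ls.foldl (fun (acc : List String × List String) seg =>
        if ["w", "W"].any (fun ch => PySem.Str.isIn ch seg) then
          if acc.2 ≠ [] then (acc.1 ++ [PySem.Str.join "\n" acc.2], ([] : List String)) else acc
        else (acc.1, acc.2 ++ [seg])) (chapters, cur)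
     if st.2 ≠ [] then st.1 ++ [PySem.Str.join "\n" st.2] else st.1) =
      chapters ++
        (if cur ++ ls.takeWhile segND ≠ [] then
          PySem.Str.join "\n" (cur ++ ls.takeWhile segND) :: segGroups ((ls.dropWhile segND).drop 1)
        else segGroups ((ls.dropWhile segND).drop 1)) := by
  induction ls generalizing chapters cur with
  | nil =>
    by_cases h : cur = [] <;> simp [h, segGroups_nil]
  | cons h t ih =>
    have hany : (["w", "W"].any (fun ch => PySem.Str.isIn ch h)) = segDelimB h := by
      simp [segDelimB]
    by_cases hd : segDelimB h = true
    · have hnd : segND h = false := by simp [segND, hd]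
      simp only [List.foldl_cons, hany, hd, if_true,
        List.takeWhile_cons, List.dropWhile_cons, hnd, Bool.false_eq_true, if_false,
        List.drop_succ_cons, List.drop_zero, List.append_nil]
      by_cases hc : cur = []
      · subst hc
        simp only [ne_eq, not_true_eq_false, if_false]
        rw [ih]
        simp only [List.nil_append]
        rw [← segGroups_eq]
      · simp only [ne_eq, hc, not_false_iff, if_true]
        rw [ih]
        simp only [List.nil_append]
        rw [← segGroups_eq]
        simp [List.append_assoc]
    · have hd' : segDelimB h = false := by simpa using hd
      have hnd : segND h = true := by simp [segND, hd']
      simp only [List.foldl_cons, hany, hd', Bool.false_eq_true, if_false,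
        List.takeWhile_cons, List.dropWhile_cons, hnd, if_true]
      rw [ih]
      have hne1 : (cur ++ [h]) ++ t.takeWhile segND ≠ [] := by simp
      have hne2 : cur ++ h :: t.takeWhile segND ≠ [] := by simp
      simp only [ne_eq, hne1, hne2, not_false_iff, if_true]
      simp [List.append_assoc]

-- segSkipB lands at i + length of the non-delimiter prefix of (lines.drop i)
theorem segSkipB_spec (lines : List String) (i : Nat) :
    segSkipB lines i = i + ((lines.drop i).takeWhile segND).length := by
  induction i using segSkipB.induct lines with
  | case1 j hj hd =>
    unfold segSkipB
    rw [if_pos hj, if_pos hd]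
    have hdrop : lines.drop j = lines[j] :: lines.drop (j + 1) := List.drop_eq_getElem_cons hj
    have hnd : segND lines[j] = false := by
      simp [segND]
      simpa [List.getD_eq_getElem?_getD, List.getElem?_eq_getElem hj] using hd
    rw [hdrop, List.takeWhile_cons, hnd]
    simp
  | case2 j hj hd ih =>
    unfold segSkipB
    rw [if_pos hj, if_neg hd]
    have hdrop : lines.drop j = lines[j] :: lines.drop (j + 1) := List.drop_eq_getElem_cons hj
    have hnd : segND lines[j] = true := by
      simp [segND]
      simpa [List.getD_eq_getElem?_getD, List.getElem?_eq_getElem hj] using hd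
    rw [hdrop, List.takeWhile_cons, if_pos hnd]
    simp only [List.length_cons]
    omega
  | case3 j hj =>
    unfold segSkipB
    rw [if_neg hj]
    rw [List.drop_eq_nil_of_le (by omega)]
    simp

-- B's scan equals the structural grouping of the remaining suffix (fuel = remaining length)
theorem segScanB_eq_fuel (lines : List String) (fuel : Nat) :
    ∀ (i : Nat) (chapters : List String), lines.length ≤ i + fuel →
      segScanB lines i chapters = chapters ++ segGroups (lines.drop i) := by
  induction fuel with
  | zero =>
    intro i chapters h
    unfold segScanB
    rw [if_neg (by omega), List.drop_eq_nil_of_le (by omega)]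
    simp [segGroups_nil]
  | succ fuel ih =>
    intro i chapters h
    by_cases hi : i < lines.length
    · unfold segScanB
      rw [if_pos hi]
      dsimp only
      rw [ih _ _ (by have := segSkipB_ge lines i; omega)]
      have hspec := segSkipB_spec lines i
      set t := ((lines.drop i).takeWhile segND).length with ht
      have hdw : (lines.drop i).dropWhile segND = lines.drop (i + t) := by
        rw [seg_dropWhile_eq_drop, ← ht, List.drop_drop]
      have hge : segGroups (lines.drop i) =
          (if (lines.drop i).takeWhile segND ≠ [] then
            PySem.Str.join "\n" ((lines.drop i).takeWhile segND) :: segGroups (lines.drop (i + t + 1))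
          else segGroups (lines.drop (i + t + 1))) := by
        rw [segGroups_eq (lines.drop i), hdw, List.drop_drop]
      rw [hspec]
      by_cases hpre : (lines.drop i).takeWhile segND = []
      · have ht0 : t = 0 := by rw [ht, hpre]; rfl
        rw [hge, if_neg (show ¬((lines.drop i).takeWhile segND ≠ []) by simp [hpre]),
          if_neg (show ¬(i < i + t) by omega)]
      · have ht0 : 0 < t := by rw [ht]; exact List.length_pos_of_ne_nil hpre
        rw [hge, if_pos (show (lines.drop i).takeWhile segND ≠ [] from hpre),
          if_pos (show i < i + t by omega)]
        have he : i + t - i = t := by omega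
        rw [he, ht, seg_take_takeWhile]
        simp
    · unfold segScanB
      rw [if_neg hi, List.drop_eq_nil_of_le (by omega)]
      simp [segGroups_nil]

theorem segScanB_eq (lines : List String) (i : Nat) (chapters : List String) :
    segScanB lines i chapters = chapters ++ segGroups (lines.drop i) :=
  segScanB_eq_fuel lines lines.length i chapters (by omega)

-- ===== VERDICT (by name: the statement is the Claim_ definition above) =====
theorem seg_alis_spec : Claim_equal_seg_alis := by
  intro text _
  unfold Spec_seg_alis seg_alis seg_alis_alt
  rw [segScanB_eq]
  simp only [List.drop_zero, List.nil_append]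
  rw [segA_loop_eq]
  simp only [List.nil_append]
  rw [← segGroups_eq]
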